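-- pv_equiv track=rewrite | github.com/PsimonL/Cryptography | Lab3/lab3_1.py | generate_stream_a
-- ===== SOURCE A (Python) =====
-- def generate_stream_a(initial_vector):
--     z = list(initial_vector)
--     stream = z[:]
--
--     for _ in range(100):
--         new_bit = (z[0] + z[1] + z[2] + z[3]) % 2
--         z.append(new_bit)
--         stream.append(new_bit)
--         z.pop(0)
--
--     return stream
-- ===== SOURCE B (Python) =====
-- def generate_stream_a(initial_vector):
--     # Same 100-bit LFSR stream, but without the separate shifting window:
--     # the window z[0..3] at step t is exactly stream[t..t+3].
--     stream = list(initial_vector)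
--     for t in range(100):
--         stream.append((stream[t] + stream[t + 1] + stream[t + 2] + stream[t + 3]) % 2)
--     return stream
-- ===== Notes on version B (the rewrite author's own statement) =====
-- stated objective: simpler
-- what changed: B drops A's separate sliding window z with its append/pop(0) shifting and reads the four taps directly from the growing stream at indices t..t+3.
import Mathlib
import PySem

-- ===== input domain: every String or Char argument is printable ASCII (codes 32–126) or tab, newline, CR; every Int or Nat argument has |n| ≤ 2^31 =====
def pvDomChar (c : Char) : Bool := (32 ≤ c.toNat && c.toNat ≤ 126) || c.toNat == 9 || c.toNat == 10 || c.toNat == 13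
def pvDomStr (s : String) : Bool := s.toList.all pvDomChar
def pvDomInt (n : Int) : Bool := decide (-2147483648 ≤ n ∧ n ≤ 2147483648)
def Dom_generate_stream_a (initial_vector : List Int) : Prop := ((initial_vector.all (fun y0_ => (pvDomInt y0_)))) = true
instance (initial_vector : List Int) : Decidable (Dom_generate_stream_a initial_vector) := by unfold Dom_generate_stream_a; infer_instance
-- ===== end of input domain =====

-- B removes A's separate sliding window z (append/pop(0)) and reads the four taps
-- directly from the growing stream at indices t..t+3 (simpler, same values).


-- ===== PORT A =====
-- one iteration of A's loop: state (z, stream); z[i] via pyGetD (in range under Pre_);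
-- z.pop(0) is the tail of the (nonempty) appended list
def genStepA (s : List Int × List Int) : List Int × List Int :=
  let nb := PySem.Int.mod (PySem.List.pyGetD s.1 0 0 + PySem.List.pyGetD s.1 1 0 +
                           PySem.List.pyGetD s.1 2 0 + PySem.List.pyGetD s.1 3 0) 2
  ((s.1 ++ [nb]).tail, s.2 ++ [nb])

def generate_stream_a (initial_vector : List Int) : List Int :=
  ((List.range 100).foldl (fun s _ => genStepA s) (initial_vector, initial_vector)).2

-- ===== PORT B =====
-- one iteration of B's loop: append (stream[t]+stream[t+1]+stream[t+2]+stream[t+3]) % 2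
def genStepB (stream : List Int) (t : Int) : List Int :=
  stream ++ [PySem.Int.mod (PySem.List.pyGetD stream t 0 + PySem.List.pyGetD stream (t + 1) 0 +
                            PySem.List.pyGetD stream (t + 2) 0 + PySem.List.pyGetD stream (t + 3) 0) 2]

def generate_stream_a_alt (initial_vector : List Int) : List Int :=
  (PySem.List.pyRange 0 100 1).foldl genStepB initial_vector

-- ===== PRECONDITION & SPEC =====
-- A raises IndexError (z[3]) on vectors shorter than 4; excluded.
def Pre_generate_stream_a (initial_vector : List Int) : Prop := 4 ≤ initial_vector.length
instance (initial_vector : List Int) : Decidable (Pre_generate_stream_a initial_vector) := by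
  unfold Pre_generate_stream_a; infer_instance
def pvWitness_generate_stream_a : List Int := [1, 0, 0, 1]

def Spec_generate_stream_a (initial_vector : List Int) (out : List Int) : Prop :=
  out = generate_stream_a_alt initial_vector
instance (initial_vector : List Int) (out : List Int) : Decidable (Spec_generate_stream_a initial_vector out) := by
  unfold Spec_generate_stream_a; infer_instance

-- ===== CLAIM =====
def Claim_equal_generate_stream_a : Prop := ∀ (initial_vector : List Int),
  Dom_generate_stream_a initial_vector → Pre_generate_stream_a initial_vector →
  Spec_generate_stream_a initial_vector (generate_stream_a initial_vector)

-- ===== LEMMAS AND PROOFS =====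

-- after n steps, A's window z is exactly B's stream with its first n elements dropped
theorem gen_invariant (iv : List Int) (h : 4 ≤ iv.length) (n : Nat) :
    (List.range n).foldl (fun s _ => genStepA s) (iv, iv) =
      (((PySem.List.pyRange 0 n 1).foldl genStepB iv).drop n,
        (PySem.List.pyRange 0 n 1).foldl genStepB iv) ∧
    ((PySem.List.pyRange 0 n 1).foldl genStepB iv).length = iv.length + n := by
  induction n with
  | zero => simp
  | succ n ih =>
    obtain ⟨hA, hL⟩ := ih
    set s := (PySem.List.pyRange 0 n 1).foldl genStepB iv with hs
    have hrange : PySem.List.pyRange 0 ((n : Int) + 1) 1 =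
        PySem.List.pyRange 0 n 1 ++ [(n : Int)] :=
      PySem.List.pyRange_one_succ_right (by positivity)
    have hcast : ((n + 1 : Nat) : Int) = (n : Int) + 1 := by push_cast; ring
    have hfoldB : (PySem.List.pyRange 0 ((n + 1 : Nat) : Int) 1).foldl genStepB iv =
        genStepB s ((n : Int)) := by
      rw [hcast, hrange, List.foldl_append, ← hs]; rfl
    have hnlt : ∀ i : Nat, i < 4 → n + i < s.length := by intro i hi; omega
    -- the four taps of A's window equal the taps of B's stream
    have htap : ∀ i : Nat, i < 4 →
        (s.drop n).getD i 0 = s.getD (n + i) 0 := by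
      intro i hi
      simp [List.getD, List.getElem?_drop]
    have hgd : ∀ i : Nat, PySem.List.pyGetD (s.drop n) (i : Int) 0 = (s.drop n).getD i 0 := by
      intro i; simp [PySem.List.pyGetD_natCast]
    have hnb : PySem.Int.mod (PySem.List.pyGetD (s.drop n) 0 0 + PySem.List.pyGetD (s.drop n) 1 0 +
        PySem.List.pyGetD (s.drop n) 2 0 + PySem.List.pyGetD (s.drop n) 3 0) 2 =
        PySem.Int.mod (PySem.List.pyGetD s (n : Int) 0 + PySem.List.pyGetD s ((n : Int) + 1) 0 +
        PySem.List.pyGetD s ((n : Int) + 2) 0 + PySem.List.pyGetD s ((n : Int) + 3) 0) 2 := by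
      have h0 := hgd 0; have h1 := hgd 1; have h2 := hgd 2; have h3 := hgd 3
      push_cast at h0 h1 h2 h3
      rw [h0, h1, h2, h3, htap 0 (by omega), htap 1 (by omega), htap 2 (by omega), htap 3 (by omega)]
      have c1 : ((n : Int) + 1) = ((n + 1 : Nat) : Int) := by push_cast; ring
      have c2 : ((n : Int) + 2) = ((n + 2 : Nat) : Int) := by push_cast; ring
      have c3 : ((n : Int) + 3) = ((n + 3 : Nat) : Int) := by push_cast; ring
      rw [c1, c2, c3]
      simp only [PySem.List.pyGetD_natCast, List.getD, Nat.add_zero]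
    set nb := PySem.Int.mod (PySem.List.pyGetD s (n : Int) 0 + PySem.List.pyGetD s ((n : Int) + 1) 0 +
        PySem.List.pyGetD s ((n : Int) + 2) 0 + PySem.List.pyGetD s ((n : Int) + 3) 0) 2 with hnbdef
    have hdropne : s.drop n ≠ [] := by
      intro hcon
      have := List.length_drop (l := s) (i := n)
      rw [hcon] at this; simp at this; omega
    have htail : ((s.drop n) ++ [nb]).tail = (s ++ [nb]).drop (n + 1) := by
      obtain ⟨x, xs, hx⟩ := List.exists_cons_of_ne_nil hdropne
      have hdropsucc : s.drop (n + 1) = xs := by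
        have : (s.drop n).tail = s.drop (n + 1) := by
          rw [List.tail_drop]
        rw [hx] at this; simpa using this.symm
      rw [hx, List.cons_append, List.tail_cons, List.drop_append_of_le_length (by omega), hdropsucc]
    constructor
    · rw [List.range_succ, List.foldl_append, hA, hfoldB]
      simp only [List.foldl_cons, List.foldl_nil]
      show genStepA (s.drop n, s) = _
      unfold genStepA genStepB
      simp only
      rw [hnb, ← hnbdef, htail]
    · rw [hfoldB]
      unfold genStepB
      simp [hL]; omega

-- ===== VERDICT =====
theorem generate_stream_a_spec : Claim_equal_generate_stream_a := by
  intro iv _ hpre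
  unfold Spec_generate_stream_a generate_stream_a generate_stream_a_alt
  have h := (gen_invariant iv hpre 100).1
  have hc : ((100 : Nat) : Int) = (100 : Int) := by norm_num
  rw [hc] at h
  rw [h]
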